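-- pv_equiv track=rewrite | github.com/slothie26/ProbabilisticDatabase | probabilisticDatabase.py | check_Independence_UCNF
-- ===== SOURCE A (Python) =====
-- def check_Independence_UCNF(ucnf):
-- 	cnf_set = set()
-- 	for cnf in ucnf:
-- 		for q in cnf[0]:
-- 			if(q[0] in cnf_set):
-- 				return False
-- 			else:
-- 				cnf_set.add(q[0])
-- 	return True
-- ===== SOURCE B (Python) =====
-- def check_Independence_UCNF(ucnf):
--     symbols = sorted(q[0] for cnf in ucnf for q in cnf[0])
--     return all(x != y for x, y in zip(symbols, symbols[1:]))
-- ===== Notes on version B (the rewrite author's own statement) =====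
-- stated objective: alternative
-- what changed: Replaces the incremental seen-set with early exit by sorting all clause head-symbols and checking that no two adjacent entries of the sorted list are equal (duplicates become neighbours after sorting).
-- outside the precondition, e.g. on check_Independence_UCNF([[[['x'], ['x']]], []]): A returns False, B raises IndexError
import Mathlib
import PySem

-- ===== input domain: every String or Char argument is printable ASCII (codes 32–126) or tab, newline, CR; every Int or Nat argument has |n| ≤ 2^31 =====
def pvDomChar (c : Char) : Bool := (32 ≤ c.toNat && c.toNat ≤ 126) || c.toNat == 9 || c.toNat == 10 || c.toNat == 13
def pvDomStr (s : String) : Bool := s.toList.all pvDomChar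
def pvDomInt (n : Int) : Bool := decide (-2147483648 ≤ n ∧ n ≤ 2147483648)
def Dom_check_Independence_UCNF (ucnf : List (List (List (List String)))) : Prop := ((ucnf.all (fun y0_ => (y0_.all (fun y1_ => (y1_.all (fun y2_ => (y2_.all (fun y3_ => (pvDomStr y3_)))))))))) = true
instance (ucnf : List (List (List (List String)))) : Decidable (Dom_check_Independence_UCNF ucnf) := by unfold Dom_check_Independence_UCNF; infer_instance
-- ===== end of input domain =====

-- B sorts all clause head-symbols and checks that no two adjacent entries of the sorted list
-- are equal, instead of A's early-exit incremental seen-set loop (objective: alternative).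

-- ===== PORT A =====
-- inner loop 'for q in cnf[0]': none = early 'return False' (duplicate found, or IndexError on q[0], which Pre_ excludes)
def pvInnerA (qs : List (List String)) (s : PySem.Set String) : Option (PySem.Set String) :=
  match qs with
  | [] => some s
  | q :: rest =>
    match PySem.List.pyGet? q 0 with
    | none => none                      -- IndexError in Python; outside Pre_
    | some x => if PySem.Set.contains s x then none else pvInnerA rest (PySem.Set.add s x)

def pvOuterA (cnfs : List (List (List (List String)))) (s : PySem.Set String) : Bool :=
  match cnfs with
  | [] => true
  | cnf :: rest =>
    match PySem.List.pyGet? cnf 0 with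
    | none => false                     -- IndexError in Python; outside Pre_
    | some qs =>
      match pvInnerA qs s with
      | none => false
      | some s' => pvOuterA rest s'

def check_Independence_UCNF (ucnf : List (List (List (List String)))) : Bool :=
  pvOuterA ucnf PySem.Set.empty

-- ===== PORT B =====
-- sorted(q[0] for cnf in ucnf for q in cnf[0]); all(x != y for x, y in zip(symbols, symbols[1:]))
def check_Independence_UCNF_alt (ucnf : List (List (List (List String)))) : Bool :=
  let symbols := PySem.List.sorted
    (ucnf.flatMap (fun cnf =>
      ((PySem.List.pyGet? cnf 0).getD []).map (fun q => (PySem.List.pyGet? q 0).getD ""))) (fun x => x) false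
  (symbols.zip (PySem.List.slice symbols (some 1) none)).all (fun p => p.1 != p.2)

-- ===== PRECONDITION & SPEC =====
-- Pre_ excludes inputs on which an empty clause or an empty symbol triple occurs (cnf[0] / q[0] raises
-- IndexError): there A either raises, or short-circuits to False on a duplicate found earlier while B's
-- full flattening pass raises.
def Pre_check_Independence_UCNF (ucnf : List (List (List (List String)))) : Prop :=
  ∀ cnf ∈ ucnf, cnf ≠ [] ∧ ∀ q ∈ cnf.headD [], q ≠ ([] : List String)
instance (ucnf : List (List (List (List String)))) : Decidable (Pre_check_Independence_UCNF ucnf) := by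
  unfold Pre_check_Independence_UCNF; infer_instance

def pvWitness_check_Independence_UCNF : List (List (List (List String))) :=
  [[[["a"]], [["b"]]], [[["c"]]]]

def Spec_check_Independence_UCNF (ucnf : List (List (List (List String)))) (out : Bool) : Prop := out = check_Independence_UCNF_alt ucnf
instance (ucnf : List (List (List (List String)))) (out : Bool) : Decidable (Spec_check_Independence_UCNF ucnf out) := by unfold Spec_check_Independence_UCNF; infer_instance

-- ===== CLAIM (what is proved, stated in full; the proofs are below) =====
def Claim_equal_check_Independence_UCNF : Prop := ∀ (ucnf : List (List (List (List String)))), Dom_check_Independence_UCNF ucnf → Pre_check_Independence_UCNF ucnf → Spec_check_Independence_UCNF ucnf (check_Independence_UCNF ucnf)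

-- ===== LEMMAS AND PROOFS =====

-- the flattened symbol list
def pvSyms (ucnf : List (List (List (List String)))) : List String :=
  ucnf.flatMap (fun cnf =>
    ((PySem.List.pyGet? cnf 0).getD []).map (fun q => (PySem.List.pyGet? q 0).getD ""))

-- on a ≤-sorted list, "no two adjacent entries are equal" ↔ Nodup
lemma pvAdjIff (l : List String) (h : l.Pairwise (· ≤ ·)) :
    ((l.zip (l.drop 1)).all (fun p => p.1 != p.2)) = true ↔ l.Nodup := by
  induction l with
  | nil => simp
  | cons a t ih =>
    cases t with
    | nil => simp
    | cons b t' =>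
      have hab : a ≤ b := (List.pairwise_cons.mp h).1 b (by simp)
      have ht : (b :: t').Pairwise (· ≤ ·) := (List.pairwise_cons.mp h).2
      have hrest := ih ht
      simp only [List.drop_succ_cons, List.drop_zero, List.zip_cons_cons, List.all_cons,
        Bool.and_eq_true, bne_iff_ne, ne_eq] at hrest ⊢
      constructor
      · rintro ⟨hne, hadj⟩
        have hnd : (b :: t').Nodup := hrest.mp hadj
        refine List.nodup_cons.mpr ⟨?_, hnd⟩
        have halt : a < b := lt_of_le_of_ne hab hne
        intro hmem
        rcases List.mem_cons.mp hmem with rfl | hmem'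
        · exact hne rfl
        · have hbx : b ≤ a := (List.pairwise_cons.mp ht).1 a hmem'
          exact absurd hbx (not_le_of_gt halt)
      · intro hnd
        obtain ⟨hna, hnd'⟩ := List.nodup_cons.mp hnd
        exact ⟨fun hab' => hna (hab' ▸ List.mem_cons_self ..), hrest.mpr hnd'⟩

lemma pvAltIff (ucnf : List (List (List (List String)))) :
    check_Independence_UCNF_alt ucnf = true ↔ (pvSyms ucnf).Nodup := by
  unfold check_Independence_UCNF_alt
  have hslice : ∀ (l : List String), PySem.List.slice l (some 1) none = l.drop 1 := by
    intro l; simp [PySem.List.slice_from]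
  simp only [hslice]
  simp only [show (List.flatMap (fun cnf => List.map (fun q => (PySem.List.pyGet? q 0).getD "") ((PySem.List.pyGet? cnf 0).getD [])) ucnf) = pvSyms ucnf from rfl]
  have hpw := PySem.List.sorted_pairwise (xs := pvSyms ucnf) (key := fun x => x) 
  rw [pvAdjIff _ hpw]
  exact List.Perm.nodup_iff (PySem.List.sorted_perm ..)

-- invariant for the inner loop
lemma pvInnerA_spec (qs : List (List String)) : ∀ (s : PySem.Set String), s.Nodup →
    (∀ q ∈ qs, q ≠ ([] : List String)) →
    pvInnerA qs s =
      (if (s ++ qs.map (fun q => (PySem.List.pyGet? q 0).getD "")).Nodup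
       then some (s ++ qs.map (fun q => (PySem.List.pyGet? q 0).getD ""))
       else none) := by
  induction qs with
  | nil => intro s hs _; simp [pvInnerA, hs]
  | cons q rest ih =>
    intro s hs hne
    have hq : q ≠ ([] : List String) := hne q (by simp)
    obtain ⟨a, t, rfl⟩ : ∃ a t, q = a :: t := by
      cases q with
      | nil => exact absurd rfl hq
      | cons a t => exact ⟨a, t, rfl⟩
    have hget : PySem.List.pyGet? (a :: t) 0 = some a := by
      simp [PySem.List.pyGet?, PySem.List.pyIdx?]
    by_cases hmem : a ∈ s
    · have hnod : ¬ (s ++ a :: rest.map (fun q => (PySem.List.pyGet? q 0).getD "")).Nodup := by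
        intro h
        exact ((List.nodup_append.mp h).2.2 a hmem a (by simp)) rfl
      simp [pvInnerA, hmem, hnod]
    · have hadd : PySem.Set.add s a = s ++ [a] := by
        unfold PySem.Set.add
        rw [if_neg (fun h => hmem ((PySem.Set.contains_iff s a).mp h))]
      have hnd : (s ++ [a]).Nodup := by
        rw [List.nodup_append]
        refine ⟨hs, List.nodup_singleton a, ?_⟩
        intro y hy b hb
        simp only [List.mem_singleton] at hb
        subst hb
        exact fun hya => hmem (hya ▸ hy)
      have hrest : ∀ q ∈ rest, q ≠ ([] : List String) := fun q hqm => hne q (by simp [hqm])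
      have hmain := ih (s ++ [a]) hnd hrest
      have hlist : s ++ [a] ++ rest.map (fun q => (PySem.List.pyGet? q 0).getD "") =
          s ++ a :: rest.map (fun q => (PySem.List.pyGet? q 0).getD "") := by simp
      rw [hlist] at hmain
      simp [pvInnerA, hmem, hmain]

-- invariant for the outer loop
lemma pvOuterA_spec (cnfs : List (List (List (List String)))) : ∀ (s : PySem.Set String), s.Nodup →
    Pre_check_Independence_UCNF cnfs →
    (pvOuterA cnfs s = true ↔ (s ++ pvSyms cnfs).Nodup) := by
  induction cnfs with
  | nil => intro s hs _; simp [pvOuterA, pvSyms, hs]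
  | cons cnf rest ih =>
    intro s hs hpre
    obtain ⟨hne, hq⟩ := hpre cnf (by simp)
    obtain ⟨qs, t, rfl⟩ : ∃ qs t, cnf = qs :: t := by
      cases cnf with
      | nil => exact absurd rfl hne
      | cons qs t => exact ⟨qs, t, rfl⟩
    have hget : PySem.List.pyGet? ((qs : List (List String)) :: t) 0 = some qs := by
      simp [PySem.List.pyGet?, PySem.List.pyIdx?]
    have hq' : ∀ q ∈ qs, q ≠ ([] : List String) := by simpa using hq
    have hsyms : pvSyms ((qs :: t) :: rest) =
        qs.map (fun q => (PySem.List.pyGet? q 0).getD "") ++ pvSyms rest := by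
      simp [pvSyms]
    simp only [pvOuterA, hget]
    rw [pvInnerA_spec qs s hs hq']
    by_cases hnd : (s ++ qs.map (fun q => (PySem.List.pyGet? q 0).getD "")).Nodup
    · have hrest : Pre_check_Independence_UCNF rest := fun c hc => hpre c (by simp [hc])
      have hmain := ih (s ++ qs.map (fun q => (PySem.List.pyGet? q 0).getD "")) hnd hrest
      simp only [hnd, if_true]
      rw [hmain, hsyms, List.append_assoc]
    · simp only [hnd, if_false]
      constructor
      · intro h; exact absurd h (by simp)
      · intro h
        exfalso
        apply hnd
        rw [hsyms, ← List.append_assoc] at h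
        exact (List.nodup_append.mp h).1

-- ===== VERDICT (by name: the statement is the Claim_ definition above) =====
theorem check_Independence_UCNF_spec : Claim_equal_check_Independence_UCNF := by
  intro ucnf _ hpre
  unfold Spec_check_Independence_UCNF
  have hA : check_Independence_UCNF ucnf = true ↔ (pvSyms ucnf).Nodup := by
    unfold check_Independence_UCNF
    have h := pvOuterA_spec ucnf PySem.Set.empty List.nodup_nil hpre
    simpa [PySem.Set.empty] using h
  have hB := pvAltIff ucnf
  cases hA' : check_Independence_UCNF ucnf
  · cases hB' : check_Independence_UCNF_alt ucnf
    · rfl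
    · exact absurd (hA.mpr (hB.mp hB')) (by simp [hA'])
  · exact (hB.mpr (hA.mp hA')).symm
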